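-- pv_equiv track=rewrite | github.com/Suraj-035/Sentinels-Digital-Democracy | scripts/news_sentiment_pipeline.py | trim_to_word_limit
-- ===== SOURCE A (Python) =====
-- def trim_to_word_limit(text, minimum_words=50, maximum_words=60):
--     words = text.split()
--     if len(words) <= maximum_words:
--         return text
--
--     sentences = [sentence.strip() for sentence in text.split(".") if sentence.strip()]
--     collected = []
--
--     for sentence in sentences:
--         candidate = ". ".join(collected + [sentence]) + "."
--         if len(candidate.split()) > maximum_words:
--             break
--         collected.append(sentence)
--
--     if collected and len(". ".join(collected).split()) >= minimum_words:
--         return ". ".join(collected) + "."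
--
--     return " ".join(words[:maximum_words]).rstrip(",.;:") + "."
-- ===== SOURCE B (Python) =====
-- def trim_to_word_limit(text, minimum_words=50, maximum_words=60):
--     words = text.split()
--     if len(words) <= maximum_words:
--         return text
--
--     sentences = [sentence.strip() for sentence in text.split(".") if sentence.strip()]
--     # joining with '. ' and a final '.' only glues periods to existing tokens,
--     # so a candidate's word count is just the cumulative sum of per-sentence word counts
--     counts = [len(s.split()) for s in sentences]
--     cums = []
--     t = 0
--     for c in counts:
--         t += c
--         cums.append(t)
--     k = sum(1 for c in cums if c <= maximum_words)
--     kept = sentences[:k]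
--
--     if kept and sum(counts[:k]) >= minimum_words:
--         return ". ".join(kept) + "."
--
--     return " ".join(words[:maximum_words]).rstrip(",.;:") + "."
-- ===== Notes on version B (the rewrite author's own statement) =====
-- stated objective: alternative
-- what changed: B never builds or re-splits candidate join strings: it maps each sentence to its word count once, takes cumulative sums, cuts the sentence list at the first cumulative sum exceeding maximum_words (a count of qualifying sums instead of A's build-join-resplit-and-break loop), and checks minimum_words against the sum of kept counts.
import Mathlib
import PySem

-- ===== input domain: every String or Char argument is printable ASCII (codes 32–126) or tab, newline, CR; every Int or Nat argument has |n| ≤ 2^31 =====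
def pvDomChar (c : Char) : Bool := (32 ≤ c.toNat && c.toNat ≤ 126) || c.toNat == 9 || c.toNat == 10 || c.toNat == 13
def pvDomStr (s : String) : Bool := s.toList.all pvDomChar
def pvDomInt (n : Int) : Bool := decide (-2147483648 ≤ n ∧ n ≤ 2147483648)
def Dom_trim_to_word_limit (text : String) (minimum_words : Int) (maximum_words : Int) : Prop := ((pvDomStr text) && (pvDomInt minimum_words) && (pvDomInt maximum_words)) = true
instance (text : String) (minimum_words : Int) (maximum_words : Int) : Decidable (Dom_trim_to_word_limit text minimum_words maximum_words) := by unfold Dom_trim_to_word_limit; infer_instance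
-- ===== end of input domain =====

-- B replaces A's rebuild-join-resplit loop by per-sentence word counts, cumulative sums and a prefix cut (alternative decomposition, same results).

-- shared primitive gap: Python's str.rstrip(",.;:") (right-strip of the given chars); PySem only has two-sided stripChars, so ported by hand, exact
def pyRstripPunct (s : List Char) : List Char :=
  (List.dropWhile (fun c => [',', '.', ';', ':'].contains c) s.reverse).reverse

-- ===== PORT A =====
-- the for-loop over sentences with `break`, as structural recursion on the same state
def trimLoopA (maxw : Int) : List (List Char) → List (List Char) → List (List Char)
  | [], collected => collected
  | s :: rest, collected =>
    let candidate := PySem.Chars.join ['.', ' '] (collected ++ [s]) ++ ['.']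
    if ((PySem.Chars.split₀ candidate).length : Int) > maxw then collected
    else trimLoopA maxw rest (collected ++ [s])

def trim_to_word_limit (text : String) (minimum_words : Int) (maximum_words : Int) : String :=
  let t := text.toList
  let words := PySem.Chars.split₀ t
  if (words.length : Int) ≤ maximum_words then text
  else
    let sentences := (PySem.Chars.splitOn t ['.']).filterMap
      (fun s => let st := PySem.Chars.strip s; if st = [] then none else some st)
    let collected := trimLoopA maximum_words sentences []
    if collected ≠ [] ∧ ((PySem.Chars.split₀ (PySem.Chars.join ['.', ' '] collected)).length : Int) ≥ minimum_words then
      String.ofList (PySem.Chars.join ['.', ' '] collected ++ ['.'])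
    else
      String.ofList (pyRstripPunct (PySem.Chars.join [' '] (PySem.List.slice words none (some maximum_words))) ++ ['.'])

-- ===== PORT B =====
-- cumulative word-count sums (Source B's running-total loop)
def cumsB (t : Int) : List Int → List Int
  | [] => []
  | c :: r => (t + c) :: cumsB (t + c) r

def trim_to_word_limit_alt (text : String) (minimum_words : Int) (maximum_words : Int) : String :=
  let t := text.toList
  let words := PySem.Chars.split₀ t
  if (words.length : Int) ≤ maximum_words then text
  else
    let sentences := (PySem.Chars.splitOn t ['.']).filterMap
      (fun s => let st := PySem.Chars.strip s; if st = [] then none else some st)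
    let counts := sentences.map (fun s => ((PySem.Chars.split₀ s).length : Int))
    let cums := cumsB 0 counts
    let k := cums.countP (fun c => decide (c ≤ maximum_words))
    let kept := sentences.take k
    if kept ≠ [] ∧ (counts.take k).sum ≥ minimum_words then
      String.ofList (PySem.Chars.join ['.', ' '] kept ++ ['.'])
    else
      String.ofList (pyRstripPunct (PySem.Chars.join [' '] (PySem.List.slice words none (some maximum_words))) ++ ['.'])

-- ===== PRECONDITION & SPEC =====
def Spec_trim_to_word_limit (text : String) (minimum_words : Int) (maximum_words : Int) (out : String) : Prop := out = trim_to_word_limit_alt text minimum_words maximum_words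
instance (text : String) (minimum_words : Int) (maximum_words : Int) (out : String) : Decidable (Spec_trim_to_word_limit text minimum_words maximum_words out) := by unfold Spec_trim_to_word_limit; infer_instance

-- ===== CLAIM (what is proved, stated in full; the proofs are below) =====
def Claim_equal_trim_to_word_limit : Prop := ∀ (text : String) (minimum_words : Int) (maximum_words : Int), Dom_trim_to_word_limit text minimum_words maximum_words → Spec_trim_to_word_limit text minimum_words maximum_words (trim_to_word_limit text minimum_words maximum_words)

-- ===== LEMMAS AND PROOFS =====

-- `goodE s` : s is nonempty and its last character is not whitespace (true of every stripped nonempty sentence)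
def goodE (s : List Char) : Bool :=
  match s.reverse with
  | [] => false
  | c :: _ => !PySem.Chars.isspace c

theorem dropWhile_head_false {α : Type} (p : α → Bool) (l : List α) (c : α) (cs : List α)
    (h : List.dropWhile p l = c :: cs) : p c = false := by
  induction l with
  | nil => simp at h
  | cons x xs ih =>
    by_cases hx : p x = true
    · rw [List.dropWhile_cons_of_pos hx] at h; exact ih h
    · rw [List.dropWhile_cons_of_neg hx] at h
      cases h; simpa using hx

theorem strip_goodE (x : List Char) (h : PySem.Chars.strip x ≠ []) :
    goodE (PySem.Chars.strip x) = true := by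
  unfold goodE
  have hs : (PySem.Chars.strip x).reverse
      = List.dropWhile PySem.Chars.isspace (PySem.Chars.lstrip x).reverse := by
    simp [PySem.Chars.strip, PySem.Chars.rstrip]
  rw [hs]
  cases hd : List.dropWhile PySem.Chars.isspace (PySem.Chars.lstrip x).reverse with
  | nil =>
    exfalso; apply h
    have : (PySem.Chars.strip x).reverse = [] := by rw [hs, hd]
    simpa using this
  | cons c cs => simp [dropWhile_head_false _ _ _ _ hd]

theorem go_nil (cur : List Char) (acc : List (List Char)) :
    PySem.Chars.split₀.go [] cur acc
      = if cur.isEmpty then acc.reverse else (cur.reverse :: acc).reverse := rfl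

theorem go_cons (c : Char) (rest cur : List Char) (acc : List (List Char)) :
    PySem.Chars.split₀.go (c :: rest) cur acc
      = if PySem.Chars.isspace c then
          (if cur.isEmpty then PySem.Chars.split₀.go rest [] acc
           else PySem.Chars.split₀.go rest [] (cur.reverse :: acc))
        else PySem.Chars.split₀.go rest (c :: cur) acc := rfl

theorem go_acc (s : List Char) : ∀ (cur : List Char) (acc : List (List Char)),
    PySem.Chars.split₀.go s cur acc = acc.reverse ++ PySem.Chars.split₀.go s cur [] := by
  induction s with
  | nil =>
    intro cur acc
    by_cases h : cur.isEmpty = true <;> simp [go_nil, h]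
  | cons c rest ih =>
    intro cur acc
    by_cases hc : PySem.Chars.isspace c = true
    · by_cases hcur : cur.isEmpty = true
      · simp only [go_cons, hc, hcur, if_true]
        exact ih [] acc
      · simp only [go_cons, hc, hcur, if_true, if_false]
        rw [ih [] (cur.reverse :: acc), ih [] [cur.reverse]]
        simp
    · simp only [go_cons, hc, if_false]
      exact ih _ _

theorem go_space (c : Char) (hc : PySem.Chars.isspace c = true) (b : List Char) (a : List Char) :
    ∀ (cur : List Char) (acc : List (List Char)), PySem.Chars.split₀.go (a ++ c :: b) cur acc
      = PySem.Chars.split₀.go a cur acc ++ PySem.Chars.split₀.go b [] [] := by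
  induction a with
  | nil =>
    intro cur acc
    by_cases hcur : cur.isEmpty = true
    · simp only [List.nil_append, go_cons, go_nil, hc, hcur, if_true]
      rw [go_acc b [] acc]
    · simp only [List.nil_append, go_cons, go_nil, hc, hcur, if_true, if_false]
      rw [go_acc b [] (cur.reverse :: acc)]; simp
  | cons x a' ih =>
    intro cur acc
    by_cases hx : PySem.Chars.isspace x = true
    · by_cases hcur : cur.isEmpty = true
      · simp [go_cons, hx, hcur, ih]
      · simp [go_cons, hx, hcur, ih]
    · simp [go_cons, hx, ih]

theorem headI_append_ne {α : Type} [Inhabited α] (l t : List α) (h : l ≠ []) :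
    (l ++ t).headI = l.headI := by
  cases l with
  | nil => exact absurd rfl h
  | cons x xs => simp

-- appending a non-space char to a string ending in a non-space char does not change the word count
theorem go_append_nonspace (d : Char) (hd : PySem.Chars.isspace d = false) :
    ∀ (s cur : List Char) (acc : List (List Char)),
      (if s.reverse = [] then cur ≠ [] else PySem.Chars.isspace (s.reverse.headI) = false) →
      (PySem.Chars.split₀.go (s ++ [d]) cur acc).length = (PySem.Chars.split₀.go s cur acc).length := by
  intro s
  induction s with
  | nil =>
    intro cur acc h
    simp only [List.reverse_nil, if_true] at h
    have hcur : cur.isEmpty = false := by simpa [List.isEmpty_iff] using h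
    simp [go_cons, go_nil, hd, hcur]
  | cons x s' ih =>
    intro cur acc h
    by_cases hnil : s' = []
    · subst hnil
      simp only [List.reverse_cons, List.reverse_nil, List.nil_append,
        List.cons_ne_nil, if_false, List.headI] at h
      -- h : isspace x = false
      simp only [List.cons_append, go_cons, h, Bool.false_eq_true, if_false]
      have hcur' : (x :: cur).isEmpty = false := by simp
      simp [go_cons, go_nil, hd, hcur']
    · have hne : s'.reverse ≠ [] := by simpa using hnil
      have h' : PySem.Chars.isspace (s'.reverse.headI) = false := by
        have hrevne : (x :: s').reverse ≠ [] := by simp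
        rw [if_neg hrevne] at h
        have : (x :: s').reverse.headI = s'.reverse.headI := by
          rw [List.reverse_cons]; exact headI_append_ne _ _ hne
        rw [this] at h; exact h
      have hcond : ∀ cur2 : List Char,
          (if s'.reverse = [] then cur2 ≠ [] else PySem.Chars.isspace (s'.reverse.headI) = false) := by
        intro cur2; rw [if_neg hne]; exact h'
      by_cases hx : PySem.Chars.isspace x = true
      · by_cases hcur : cur.isEmpty = true
        · simp only [List.cons_append, go_cons, hx, hcur, if_true]
          exact ih [] acc (hcond [])
        · simp only [List.cons_append, go_cons, hx, hcur, if_true, if_false]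
          exact ih [] _ (hcond [])
      · simp only [List.cons_append, go_cons, hx, if_false]
        exact ih (x :: cur) acc (hcond _)

-- word count (number of tokens of Python's str.split())
def wc (s : List Char) : Nat := (PySem.Chars.split₀ s).length

theorem wc_append_dot (s : List Char) (h : goodE s = true) : wc (s ++ ['.']) = wc s := by
  unfold wc PySem.Chars.split₀
  apply go_append_nonspace '.' (by decide)
  unfold goodE at h
  cases hr : s.reverse with
  | nil => rw [hr] at h; simp at h
  | cons c cs => rw [hr] at h; simp only [Bool.not_eq_true'] at h; simp [hr, List.headI, h]

theorem goodE_ne_nil (s : List Char) (h : goodE s = true) : s ≠ [] := by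
  unfold goodE at h
  cases hr : s.reverse with
  | nil => rw [hr] at h; simp at h
  | cons c cs => intro he; subst he; simp at hr

-- joining good sentences with ". " : the result is good and its word count is the sum of the parts'
theorem join_good : ∀ (l : List (List Char)), l ≠ [] → (∀ s ∈ l, goodE s = true) →
    goodE (PySem.Chars.join ['.', ' '] l) = true ∧
    wc (PySem.Chars.join ['.', ' '] l) = (l.map wc).sum := by
  intro l
  induction l with
  | nil => intro h; exact absurd rfl h
  | cons s r ih =>
    intro _ hall
    by_cases hrnil : r = []
    · subst hrnil
      constructor
      · simpa [PySem.Chars.join, List.intercalate] using hall s (by simp)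
      · simp [PySem.Chars.join, List.intercalate]
    · have hallr : ∀ t ∈ r, goodE t = true := fun t ht => hall t (by simp [ht])
      obtain ⟨hg, hwc⟩ := ih hrnil hallr
      have hjoin : PySem.Chars.join ['.', ' '] (s :: r)
          = (s ++ ['.']) ++ ' ' :: PySem.Chars.join ['.', ' '] r := by
        obtain ⟨y, r', rfl⟩ := List.exists_cons_of_ne_nil hrnil
        simp [PySem.Chars.join, List.intercalate, List.intersperse]
      have hjr_ne : PySem.Chars.join ['.', ' '] r ≠ [] := goodE_ne_nil _ hg
      constructor
      · unfold goodE
        rw [hjoin]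
        have heq : ((s ++ ['.']) ++ ' ' :: PySem.Chars.join ['.', ' '] r).reverse
            = (PySem.Chars.join ['.', ' '] r).reverse ++ (' ' :: ((s ++ ['.']).reverse)) := by
          simp
        rw [heq]
        have hne : (PySem.Chars.join ['.', ' '] r).reverse ≠ [] := by simpa using hjr_ne
        unfold goodE at hg
        cases hrev : (PySem.Chars.join ['.', ' '] r).reverse with
        | nil => exact absurd hrev hne
        | cons c cs => rw [hrev] at hg; simpa using hg
      · rw [hjoin]
        unfold wc PySem.Chars.split₀
        rw [go_space ' ' (by decide) _ (s ++ ['.'])]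
        have h1 : (PySem.Chars.split₀.go (s ++ ['.']) [] []).length = wc (s ++ ['.']) := rfl
        have h2 : (PySem.Chars.split₀.go (PySem.Chars.join ['.', ' '] r) [] []).length
            = wc (PySem.Chars.join ['.', ' '] r) := rfl
        rw [List.length_append, h1, h2, hwc, wc_append_dot s (hall s (by simp))]
        (simp [wc, PySem.Chars.split₀]) <;> rfl

theorem cums_ge (l : List Int) (hl : ∀ c ∈ l, 0 ≤ c) : ∀ t, ∀ e ∈ cumsB t l, t ≤ e := by
  induction l with
  | nil => intro t e he; simp [cumsB] at he
  | cons c r ih =>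
    intro t e he
    have hc : 0 ≤ c := hl c (by simp)
    simp only [cumsB, List.mem_cons] at he
    rcases he with rfl | he
    · omega
    · have := ih (fun x hx => hl x (by simp [hx])) (t + c) e he
      omega

theorem sum_take_cast (l : List (List Char)) (k : Nat) :
    ((l.map (fun s => ((PySem.Chars.split₀ s).length : Int))).take k).sum
      = (((l.take k).map wc).sum : Int) := by
  induction l generalizing k with
  | nil => simp
  | cons s r ih =>
    cases k with
    | zero => simp
    | succ k' => (simp [List.take_succ_cons, ih, wc]) <;> (push_cast; ring)

-- A's loop equals B's prefix cut
theorem loop_eq (mw : Int) : ∀ (L col : List (List Char)) (t : Int),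
    (∀ s ∈ col, goodE s = true) → (∀ s ∈ L, goodE s = true) →
    t = (((col.map wc).sum : Nat) : Int) →
    trimLoopA mw L col
      = col ++ L.take ((cumsB t (L.map (fun s => ((PySem.Chars.split₀ s).length : Int)))).countP
          (fun c => decide (c ≤ mw))) := by
  intro L
  induction L with
  | nil => intro col t _ _ _; simp [trimLoopA, cumsB]
  | cons s rest ih =>
    intro col t hcol hL ht
    have hs : goodE s = true := hL s (by simp)
    have hallcs : ∀ x ∈ col ++ [s], goodE x = true := by
      intro x hx; rcases List.mem_append.mp hx with h | h
      · exact hcol x h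
      · simp at h; subst h; exact hs
    have hcand : ((PySem.Chars.split₀ (PySem.Chars.join ['.', ' '] (col ++ [s]) ++ ['.'])).length : Int)
        = t + ((PySem.Chars.split₀ s).length : Int) := by
      obtain ⟨hg, hwc⟩ := join_good (col ++ [s]) (by simp) hallcs
      have : (PySem.Chars.split₀ (PySem.Chars.join ['.', ' '] (col ++ [s]) ++ ['.'])).length
          = ((col ++ [s]).map wc).sum := by
        rw [← hwc]; exact wc_append_dot _ hg
      rw [this, ht]
      (simp [wc]) <;> (push_cast; ring)
    simp only [trimLoopA, List.map_cons, cumsB]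
    by_cases hbr : ((PySem.Chars.split₀ (PySem.Chars.join ['.', ' '] (col ++ [s]) ++ ['.'])).length : Int) > mw
    · rw [if_pos hbr]
      have hfirst : ¬ (t + ((PySem.Chars.split₀ s).length : Int) ≤ mw) := by rw [← hcand]; omega
      have htail : ∀ e ∈ cumsB (t + ((PySem.Chars.split₀ s).length : Int))
          (rest.map (fun x => ((PySem.Chars.split₀ x).length : Int))), ¬ (e ≤ mw) := by
        intro e he
        have := cums_ge _ (by intro c hc; simp at hc; obtain ⟨x, _, rfl⟩ := hc; positivity) _ e he
        omega
      have : (cumsB (t + ((PySem.Chars.split₀ s).length : Int))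
          (rest.map (fun x => ((PySem.Chars.split₀ x).length : Int)))).countP
            (fun c => decide (c ≤ mw)) = 0 := by
        rw [List.countP_eq_zero]
        intro e he; simpa using htail e he
      rw [List.countP_cons, this]
      simp [hfirst]
    · rw [if_neg hbr]
      have hle : t + ((PySem.Chars.split₀ s).length : Int) ≤ mw := by rw [← hcand]; omega
      have ht' : t + ((PySem.Chars.split₀ s).length : Int)
          = ((((col ++ [s]).map wc).sum : Nat) : Int) := by
        (rw [ht]; simp [wc]) <;> (push_cast; ring)
      rw [ih (col ++ [s]) _ hallcs (fun x hx => hL x (by simp [hx])) ht']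
      rw [List.countP_cons]
      simp only [hle, decide_true, if_true]
      rw [List.take_succ_cons]
      simp

-- ===== VERDICT (by name: the statement is the Claim_ definition above) =====
theorem trim_to_word_limit_spec : Claim_equal_trim_to_word_limit := by
  intro text minimum_words maximum_words _
  unfold Spec_trim_to_word_limit trim_to_word_limit trim_to_word_limit_alt
  by_cases hguard : ((PySem.Chars.split₀ text.toList).length : Int) ≤ maximum_words
  · simp [hguard]
  · simp only [hguard, if_false]
    set sentences := (PySem.Chars.splitOn text.toList ['.']).filterMap
      (fun s => let st := PySem.Chars.strip s; if st = [] then none else some st) with hsent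
    have hgood : ∀ s ∈ sentences, goodE s = true := by
      intro s hs
      rw [hsent] at hs
      simp only [List.mem_filterMap] at hs
      obtain ⟨x, _, hx⟩ := hs
      by_cases he : PySem.Chars.strip x = []
      · simp [he] at hx
      · simp only [he, if_neg, reduceIte] at hx
        have hx' : PySem.Chars.strip x = s := by simpa using hx
        exact hx' ▸ strip_goodE x he
    set k := (cumsB 0 (sentences.map (fun s => ((PySem.Chars.split₀ s).length : Int)))).countP
      (fun c => decide (c ≤ maximum_words)) with hk
    have hloop : trimLoopA maximum_words sentences [] = sentences.take k := by
      rw [loop_eq maximum_words sentences [] 0 (by simp) hgood (by simp), hk]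
      simp
    rw [hloop]
    by_cases hne : sentences.take k = []
    · simp [hne]
    · have hgoodk : ∀ s ∈ sentences.take k, goodE s = true :=
        fun s hs => hgood s (List.mem_of_mem_take hs)
      obtain ⟨_, hwc⟩ := join_good (sentences.take k) hne hgoodk
      have hmin : ((PySem.Chars.split₀ (PySem.Chars.join ['.', ' '] (sentences.take k))).length : Int)
          = ((sentences.map (fun s => ((PySem.Chars.split₀ s).length : Int))).take k).sum := by
        rw [sum_take_cast]
        exact_mod_cast congrArg (Nat.cast : Nat → Int) hwc
      rw [hmin]
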